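-- pv_equiv track=rewrite | github.com/qilimanjaro-tech/qiboconnection | tests/end2end/utils/http.py | _determine_results_emoji
-- ===== SOURCE A (Python) =====
-- PYTEST_VALID_CHARACTERS = [".", "F", "s", "x"]
--
-- PYTEST_SKIP_CHARACTERS = ["s"]
--
-- PYTEST_FAILURE_CHARACTERS = ["F"]
--
-- def _determine_results_emoji(summary: str):
--     """Computes which emoji should we use to indicate tests results depending on the presence of failed and/or skipped
--     tests
--     Args:
--         summary: text containing summary of the results of the tests
--
--     Returns:
--         str: emoji code understandable by slack
--     """
--     first_report_line = summary.split(" ")[0]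
--
--     if False in [test_result in PYTEST_VALID_CHARACTERS for test_result in first_report_line]:
--         return ":warning:"
--     if True in [test_result in PYTEST_FAILURE_CHARACTERS for test_result in first_report_line]:
--         return ":red_circle:"
--     if True in [test_result in PYTEST_SKIP_CHARACTERS for test_result in first_report_line]:
--         return ":large_yellow_circle:"
--     return ":large_green_circle:"
-- ===== SOURCE B (Python) =====
-- PYTEST_VALID_CHARACTERS = [".", "F", "s", "x"]
--
-- PYTEST_SKIP_CHARACTERS = ["s"]
--
-- PYTEST_FAILURE_CHARACTERS = ["F"]
--
-- def _determine_results_emoji(summary: str):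
--     first_report_line = summary.split(" ")[0]
--     has_invalid = has_failure = has_skip = False
--     for ch in first_report_line:
--         if ch not in PYTEST_VALID_CHARACTERS:
--             has_invalid = True
--         if ch == "F":
--             has_failure = True
--         if ch == "s":
--             has_skip = True
--     if has_invalid:
--         return ":warning:"
--     if has_failure:
--         return ":red_circle:"
--     if has_skip:
--         return ":large_yellow_circle:"
--     return ":large_green_circle:"
-- ===== Notes on version B (the rewrite author's own statement) =====
-- stated objective: simpler
-- what changed: Replaces A's three materialised membership-comprehension lists (each scanned with 'False in'/'True in') by one pass over the first report line accumulating three boolean flags, then a branch on the flags.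
import Mathlib
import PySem

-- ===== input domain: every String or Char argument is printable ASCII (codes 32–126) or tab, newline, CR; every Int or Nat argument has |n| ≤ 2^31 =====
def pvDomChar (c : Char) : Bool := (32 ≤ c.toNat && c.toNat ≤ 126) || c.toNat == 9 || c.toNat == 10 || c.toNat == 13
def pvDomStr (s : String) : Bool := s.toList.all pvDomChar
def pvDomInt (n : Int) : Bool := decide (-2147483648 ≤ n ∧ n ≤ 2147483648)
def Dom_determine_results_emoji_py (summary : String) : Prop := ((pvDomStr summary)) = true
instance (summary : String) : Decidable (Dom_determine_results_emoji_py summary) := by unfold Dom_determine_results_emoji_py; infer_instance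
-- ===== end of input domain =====

-- B replaces A's three materialised membership lists (each then scanned with 'in') by a
-- single pass over the first report line accumulating three boolean flags — objective: simpler.

-- ===== PORT A =====
def pvValidChars : List Char := ['.', 'F', 's', 'x']
def pvSkipChars : List Char := ['s']
def pvFailureChars : List Char := ['F']

def determine_results_emoji_py (summary : String) : String :=
  -- summary.split(" ")[0]: splitOn always returns a non-empty list (Python's split never returns [])
  let first_report_line := ((PySem.Str.split? summary " ").getD []).headD ""
  if (first_report_line.toList.map (fun c => pvValidChars.contains c)).contains false then
    ":warning:"
  else if (first_report_line.toList.map (fun c => pvFailureChars.contains c)).contains true then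
    ":red_circle:"
  else if (first_report_line.toList.map (fun c => pvSkipChars.contains c)).contains true then
    ":large_yellow_circle:"
  else ":large_green_circle:"

-- ===== PORT B =====
def pvFlagsStep (acc : Bool × Bool × Bool) (c : Char) : Bool × Bool × Bool :=
  let acc := if !pvValidChars.contains c then (true, acc.2.1, acc.2.2) else acc
  let acc := if c == 'F' then (acc.1, true, acc.2.2) else acc
  if c == 's' then (acc.1, acc.2.1, true) else acc

def determine_results_emoji_py_alt (summary : String) : String :=
  let first_report_line := ((PySem.Str.split? summary " ").getD []).headD ""
  let flags := first_report_line.toList.foldl pvFlagsStep (false, false, false)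
  if flags.1 then ":warning:"
  else if flags.2.1 then ":red_circle:"
  else if flags.2.2 then ":large_yellow_circle:"
  else ":large_green_circle:"

-- ===== PRECONDITION & SPEC =====
def Spec_determine_results_emoji_py (summary : String) (out : String) : Prop := out = determine_results_emoji_py_alt summary
instance (summary : String) (out : String) : Decidable (Spec_determine_results_emoji_py summary out) := by unfold Spec_determine_results_emoji_py; infer_instance

-- ===== CLAIM (what is proved, stated in full; the proofs are below) =====
def Claim_equal_determine_results_emoji_py : Prop := ∀ (summary : String), Dom_determine_results_emoji_py summary → Spec_determine_results_emoji_py summary (determine_results_emoji_py summary)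

-- ===== LEMMAS AND PROOFS =====

-- B's fold computes the three 'any' flags.
theorem pvFlags_eq (l : List Char) (a b c : Bool) :
    l.foldl pvFlagsStep (a, b, c) =
      (a || l.any (fun x => !pvValidChars.contains x),
       b || l.any (fun x => x == 'F'),
       c || l.any (fun x => x == 's')) := by
  induction l generalizing a b c with
  | nil => simp
  | cons h t ih =>
    simp only [List.foldl_cons, List.any_cons]
    rw [show pvFlagsStep (a, b, c) h =
        (a || !pvValidChars.contains h, b || (h == 'F'), c || (h == 's')) by
      simp [pvFlagsStep]; split_ifs <;> simp_all]
    rw [ih]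
    simp [Bool.or_assoc]

-- A's 'False in [x in VALID for x in line]' is the negated 'all'.
theorem pv_contains_false (l : List Char) (p : Char → Bool) :
    (l.map p).contains false = l.any (fun x => !p x) := by
  induction l with
  | nil => simp
  | cons h t ih =>
    simp only [List.map_cons, List.contains_cons, List.any_cons, ih]
    cases p h <;> simp

-- A's 'True in [x in S for x in line]' is 'any'.
theorem pv_contains_true (l : List Char) (p : Char → Bool) :
    (l.map p).contains true = l.any p := by
  induction l with
  | nil => simp
  | cons h t ih =>
    simp only [List.map_cons, List.contains_cons, List.any_cons, ih]
    cases p h <;> simp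

-- ===== VERDICT (by name: the statement is the Claim_ definition above) =====
theorem determine_results_emoji_py_spec : Claim_equal_determine_results_emoji_py := by
  intro summary _
  unfold Spec_determine_results_emoji_py determine_results_emoji_py determine_results_emoji_py_alt
  dsimp only
  generalize (((PySem.Str.split? summary " ").getD []).headD "").toList = l
  rw [pvFlags_eq, pv_contains_false, pv_contains_true, pv_contains_true]
  have hF : (fun x => pvFailureChars.contains x) = (fun x : Char => x == 'F') := by
    funext x; simp only [pvFailureChars, List.contains_cons, List.contains_nil, Bool.or_false]
  have hS : (fun x => pvSkipChars.contains x) = (fun x : Char => x == 's') := by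
    funext x; simp only [pvSkipChars, List.contains_cons, List.contains_nil, Bool.or_false]
  rw [hF, hS]
  simp only [Bool.false_or]
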